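-- pv_equiv track=rewrite | github.com/mtheof04/Ade-Scripts | Experiments/Experiment 3/Analysis Scripts/concat_iostat_files.py | strip_unwanted_sections
-- ===== SOURCE A (Python) =====
-- def strip_unwanted_sections(lines, iteration_number, keep_header=False):
--     """
--     Function to strip unwanted sections from iostat files and skip everything until the second 'avg-cpu:' line.
--     It also adds the iteration number to the output.
--     """
--     output_lines = [f"Iteration {iteration_number}\n"]  # Add the iteration number at the beginning
--     avg_cpu_count = 0
--     inside_skip_section = True
--
--     for line in lines:
--         # Check for 'avg-cpu:' and count its occurrence
--         if 'avg-cpu:' in line: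
--             avg_cpu_count += 1
--
--         # If we've reached the second 'avg-cpu:', stop skipping lines
--         if avg_cpu_count == 2:
--             inside_skip_section = False
--
--         # Add lines after the second 'avg-cpu:' occurrence
--         if not inside_skip_section:
--             output_lines.append(line)
--
--     return output_lines
-- ===== SOURCE B (Python) =====
-- def strip_unwanted_sections(lines, iteration_number, keep_header=False):
--     """Index-based rewrite: find the marker positions once, then slice from the
--     second 'avg-cpu:' line (inclusive) to the end."""
--     lines = list(lines)
--     markers = [i for i, line in enumerate(lines) if 'avg-cpu:' in line]
--     output = ["Iteration {}\n".format(iteration_number)]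
--     if len(markers) >= 2:
--         output.extend(lines[markers[1]:])
--     return output
-- ===== Notes on version B (the rewrite author's own statement) =====
-- stated objective: simpler
-- what changed: Replaces A's stateful counter/flag loop with a one-shot list of marker indices followed by a single slice lines[markers[1]:] (or just the header when fewer than two markers exist).
import Mathlib
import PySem

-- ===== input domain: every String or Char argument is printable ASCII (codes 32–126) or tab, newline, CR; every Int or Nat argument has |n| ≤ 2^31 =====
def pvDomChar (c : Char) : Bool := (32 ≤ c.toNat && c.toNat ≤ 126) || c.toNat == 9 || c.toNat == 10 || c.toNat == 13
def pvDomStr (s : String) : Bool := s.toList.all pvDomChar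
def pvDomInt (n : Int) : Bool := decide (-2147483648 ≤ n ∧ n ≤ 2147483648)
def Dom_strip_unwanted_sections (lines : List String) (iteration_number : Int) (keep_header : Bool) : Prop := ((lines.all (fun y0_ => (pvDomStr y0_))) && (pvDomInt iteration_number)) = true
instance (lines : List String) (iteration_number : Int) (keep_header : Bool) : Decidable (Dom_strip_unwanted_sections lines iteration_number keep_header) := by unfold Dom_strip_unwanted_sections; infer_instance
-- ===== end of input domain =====

-- B replaces A's counter/flag loop by collecting the marker indices once and slicing from the second one (objective: simpler).

-- ===== PORT A =====
def pvStepA (st : List String × Int × Bool) (line : String) : List String × Int × Bool :=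
  let avg_cpu_count := if PySem.Str.isIn "avg-cpu:" line then st.2.1 + 1 else st.2.1
  let inside_skip_section := if avg_cpu_count == 2 then false else st.2.2
  let output_lines := if !inside_skip_section then st.1 ++ [line] else st.1
  (output_lines, avg_cpu_count, inside_skip_section)

def strip_unwanted_sections (lines : List String) (iteration_number : Int) (keep_header : Bool) : List String :=
  (lines.foldl pvStepA (["Iteration " ++ PySem.Int.toStr iteration_number ++ "\n"], (0 : Int), true)).1

-- ===== PORT B =====
def strip_unwanted_sections_alt (lines : List String) (iteration_number : Int) (keep_header : Bool) : List String :=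
  let markers := ((PySem.List.enumerate lines 0).filter (fun p => PySem.Str.isIn "avg-cpu:" p.2)).map (·.1)
  let output := ["Iteration " ++ PySem.Int.toStr iteration_number ++ "\n"]
  match markers with
  | _ :: m2 :: _ => output ++ PySem.List.slice lines (some m2) none
  | _ => output

-- ===== PRECONDITION & SPEC =====
def Spec_strip_unwanted_sections (lines : List String) (iteration_number : Int) (keep_header : Bool) (out : List String) : Prop := out = strip_unwanted_sections_alt lines iteration_number keep_header
instance (lines : List String) (iteration_number : Int) (keep_header : Bool) (out : List String) : Decidable (Spec_strip_unwanted_sections lines iteration_number keep_header out) := by unfold Spec_strip_unwanted_sections; infer_instance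

-- ===== CLAIM (what is proved, stated in full; the proofs are below) =====
def Claim_equal_strip_unwanted_sections : Prop := ∀ (lines : List String) (iteration_number : Int) (keep_header : Bool), Dom_strip_unwanted_sections lines iteration_number keep_header → Spec_strip_unwanted_sections lines iteration_number keep_header (strip_unwanted_sections lines iteration_number keep_header)

-- ===== LEMMAS AND PROOFS =====

-- the tail of ls starting at the first marker line (inclusive); [] if none
def pvTail1 : List String → List String
  | [] => []
  | l :: ls => if PySem.Str.isIn "avg-cpu:" l then l :: ls else pvTail1 ls

-- the tail of ls starting at the second marker line (inclusive); [] if fewer than two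
def pvTail2 : List String → List String
  | [] => []
  | l :: ls => if PySem.Str.isIn "avg-cpu:" l then pvTail1 ls else pvTail2 ls

-- A's loop once inside_skip_section is false: it appends every remaining line
theorem foldA_false (ls : List String) : ∀ (out : List String) (c : Int),
    (ls.foldl pvStepA (out, c, false)).1 = out ++ ls := by
  induction ls with
  | nil => intro out c; simp
  | cons l ls ih =>
    intro out c
    simp only [List.foldl, pvStepA]
    by_cases h : PySem.Str.isIn "avg-cpu:" l = true <;> simp at h <;> simp [h, ih]

-- A's loop with count 1 and skipping on: it appends from the next marker line on
theorem foldA_one (ls : List String) : ∀ (out : List String),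
    (ls.foldl pvStepA (out, 1, true)).1 = out ++ pvTail1 ls := by
  induction ls with
  | nil => intro out; simp [pvTail1]
  | cons l ls ih =>
    intro out
    simp only [List.foldl, pvStepA]
    by_cases h : PySem.Str.isIn "avg-cpu:" l = true <;> simp at h <;>
      simp [h, pvTail1, foldA_false, ih]

-- A's loop from the initial state: it appends from the second marker line on
theorem foldA_zero (ls : List String) : ∀ (out : List String),
    (ls.foldl pvStepA (out, 0, true)).1 = out ++ pvTail2 ls := by
  induction ls with
  | nil => intro out; simp [pvTail2]
  | cons l ls ih =>
    intro out
    simp only [List.foldl, pvStepA]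
    by_cases h : PySem.Str.isIn "avg-cpu:" l = true <;> simp at h <;>
      simp [h, pvTail2, foldA_one, ih]

-- B's marker-index list, enumeration starting at s
def pvMarkers (ls : List String) (s : Int) : List Int :=
  ((PySem.List.enumerate ls s).filter (fun p => PySem.Str.isIn "avg-cpu:" p.2)).map (·.1)

-- first marker: none ↔ pvTail1 is empty; otherwise the head says where pvTail1 starts
theorem markers_head (ls : List String) : ∀ (s : Nat),
    (pvMarkers ls s = [] → pvTail1 ls = []) ∧
    (∀ m rest, pvMarkers ls s = m :: rest →
      ∃ j : Nat, m = ((s + j : Nat) : Int) ∧ pvTail1 ls = ls.drop j) := by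
  induction ls with
  | nil => intro s; simp [pvMarkers, pvTail1, PySem.List.enumerate_nil]
  | cons l ls ih =>
    intro s
    by_cases h : PySem.Str.isIn "avg-cpu:" l = true <;> simp at h
    · constructor
      · intro hm; simp [pvMarkers, PySem.List.enumerate_cons, h] at hm
      · intro m rest hm
        simp only [pvMarkers, PySem.List.enumerate_cons] at hm
        simp [h] at hm
        exact ⟨0, by simp [hm.1], by simp [pvTail1, h]⟩
    · have hshift : pvMarkers (l :: ls) s = pvMarkers ls ((s + 1 : Nat)) := by
        simp only [pvMarkers, PySem.List.enumerate_cons]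
        simp [h]
      constructor
      · intro hm
        rw [hshift] at hm
        have := (ih (s + 1)).1 hm
        simp [pvTail1, h, this]
      · intro m rest hm
        rw [hshift] at hm
        obtain ⟨j, hj, ht⟩ := (ih (s + 1)).2 m rest hm
        exact ⟨j + 1, by push_cast at hj ⊢; omega, by simp [pvTail1, h, ht]⟩

-- second marker: fewer than two ↔ pvTail2 is empty; otherwise it says where pvTail2 starts
theorem markers_second (ls : List String) : ∀ (s : Nat),
    ((pvMarkers ls s).length < 2 → pvTail2 ls = []) ∧
    (∀ m1 m2 rest, pvMarkers ls s = m1 :: m2 :: rest →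
      ∃ j : Nat, m2 = ((s + j : Nat) : Int) ∧ pvTail2 ls = ls.drop j) := by
  induction ls with
  | nil => intro s; simp [pvMarkers, pvTail2, PySem.List.enumerate_nil]
  | cons l ls ih =>
    intro s
    by_cases h : PySem.Str.isIn "avg-cpu:" l = true <;> simp at h
    · have hcons : pvMarkers (l :: ls) s = (s : Int) :: pvMarkers ls ((s + 1 : Nat)) := by
        simp only [pvMarkers, PySem.List.enumerate_cons]
        simp [h]
      constructor
      · intro hlen
        rw [hcons] at hlen
        have hnil : pvMarkers ls (s + 1) = [] := by
          cases hx : pvMarkers ls ((s + 1 : Nat)) with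
          | nil => exact hx
          | cons a b => rw [hx] at hlen; simp at hlen
        have := (markers_head ls (s + 1)).1 hnil
        simp [pvTail2, h, this]
      · intro m1 m2 rest hm
        rw [hcons] at hm
        have htl : pvMarkers ls ((s + 1 : Nat)) = m2 :: rest := (List.cons.injEq _ _ _ _ ▸ hm).2
        obtain ⟨j, hj, ht⟩ := (markers_head ls (s + 1)).2 m2 rest htl
        exact ⟨j + 1, by push_cast at hj ⊢; omega, by simp [pvTail2, h, ht]⟩
    · have hshift : pvMarkers (l :: ls) s = pvMarkers ls ((s + 1 : Nat)) := by
        simp only [pvMarkers, PySem.List.enumerate_cons]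
        simp [h]
      constructor
      · intro hlen
        rw [hshift] at hlen
        have := (ih (s + 1)).1 hlen
        simp [pvTail2, h, this]
      · intro m1 m2 rest hm
        rw [hshift] at hm
        obtain ⟨j, hj, ht⟩ := (ih (s + 1)).2 m1 m2 rest hm
        exact ⟨j + 1, by push_cast at hj ⊢; omega, by simp [pvTail2, h, ht]⟩

-- ===== VERDICT (by name: the statement is the Claim_ definition above) =====
theorem strip_unwanted_sections_spec : Claim_equal_strip_unwanted_sections := by
  intro lines iteration_number keep_header _
  unfold Spec_strip_unwanted_sections strip_unwanted_sections strip_unwanted_sections_alt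
  rw [foldA_zero]
  have hz : ((0 : Nat) : Int) = (0 : Int) := by norm_cast
  cases hm : pvMarkers lines 0 with
  | nil =>
    have h2 : pvTail2 lines = [] := (markers_second lines 0).1 (by rw [hz, hm]; simp)
    rw [h2]
    simp only [pvMarkers] at hm
    rw [hm]
    simp
  | cons m1 tl =>
    cases tl with
    | nil =>
      have h2 : pvTail2 lines = [] := (markers_second lines 0).1 (by rw [hz, hm]; simp)
      rw [h2]
      simp only [pvMarkers] at hm
      rw [hm]
      simp
    | cons m2 rest =>
      obtain ⟨j, hj, ht⟩ := (markers_second lines 0).2 m1 m2 rest (by rw [hz, hm])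
      rw [ht]
      simp only [pvMarkers] at hm
      simp only [hm, hj]
      rw [show (((0 : Nat) + j : Nat) : Int) = ((j : Nat) : Int) by push_cast; ring,
          PySem.List.slice_from_natCast]
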